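-- pv_equiv track=rewrite | github.com/MKrumscheid/ABS-CDSS | Prototyp/backend/rag_service_advanced.py | _contains_table
-- ===== SOURCE A (Python) =====
-- def _contains_table(text: str) -> bool:
--     """Check if text contains table markers"""
--     table_indicators = [
--         'Tabelle', 'Tab.', '|', '---',
--         'Dosierung', 'mg/kg', 'Antibiotikum',
--         '<table>', '</table>'
--     ]
--     text_lower = text.lower()
--     return any(indicator.lower() in text_lower for indicator in table_indicators)
-- ===== SOURCE B (Python) =====
-- # Multi-pattern single pass: simulate all partial matches simultaneously (NFA state-set
-- # scan) instead of one independent substring search per marker.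
-- _MARKERS = [m.lower() for m in [
--     'Tabelle', 'Tab.', '|', '---',
--     'Dosierung', 'mg/kg', 'Antibiotikum',
--     '<table>', '</table>'
-- ]]
--
-- def _contains_table(text: str) -> bool:
--     """Check if text contains table markers"""
--     active = []  # remaining suffixes of markers whose start matched so far
--     for ch in text.lower():
--         nxt = []
--         for rem in active + _MARKERS:
--             if rem[0] == ch:
--                 rest = rem[1:]
--                 if not rest:
--                     return True
--                 nxt.append(rest)
--         active = nxt
--     return False
-- ===== Notes on version B (the rewrite author's own statement) =====
-- stated objective: alternative
-- what changed: Replaces nine independent case-insensitive substring scans with one left-to-right pass that simulates all partial marker matches simultaneously (an NFA state-set scan carrying the remaining suffix of each marker whose start has matched).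
import Mathlib
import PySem

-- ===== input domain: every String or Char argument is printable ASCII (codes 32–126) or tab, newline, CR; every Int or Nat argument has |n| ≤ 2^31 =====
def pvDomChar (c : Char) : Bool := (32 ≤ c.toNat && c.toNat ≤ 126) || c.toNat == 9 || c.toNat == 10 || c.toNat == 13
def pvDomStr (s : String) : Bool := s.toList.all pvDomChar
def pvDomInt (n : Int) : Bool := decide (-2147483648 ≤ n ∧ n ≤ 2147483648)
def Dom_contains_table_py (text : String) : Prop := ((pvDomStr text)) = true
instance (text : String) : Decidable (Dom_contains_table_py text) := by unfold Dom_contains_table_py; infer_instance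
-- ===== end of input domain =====

-- B replaces A's nine independent case-insensitive substring scans by one left-to-right
-- pass that simulates all partial marker matches simultaneously (NFA state-set scan).


-- ===== PORT A =====
def tableIndicators : List String :=
  ["Tabelle", "Tab.", "|", "---", "Dosierung", "mg/kg", "Antibiotikum", "<table>", "</table>"]

def contains_table_py (text : String) : Bool :=
  let text_lower := PySem.Str.lower text
  tableIndicators.any (fun indicator => PySem.Str.isIn (PySem.Str.lower indicator) text_lower)

-- ===== PORT B =====
-- module-level: _MARKERS = [m.lower() for m in [...]]
def markersB : List (List Char) :=
  (["Tabelle", "Tab.", "|", "---", "Dosierung", "mg/kg", "Antibiotikum", "<table>", "</table>"] :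
    List String).map (fun m => PySem.Chars.lower m.toList)

-- the inner 'for rem in active + _MARKERS' loop: none = early 'return True',
-- some nxt = the list of advanced remainders ('[]' case is a totality guard; never hit)
def advanceB : List (List Char) → Char → Option (List (List Char))
  | [], _ => some []
  | rem :: rs, c =>
    match rem with
    | [] => advanceB rs c
    | d :: ds =>
      if d == c then
        if ds.isEmpty then none
        else (advanceB rs c).map (fun nxt => ds :: nxt)
      else advanceB rs c

-- the outer 'for ch in text.lower()' loop
def scanB : List (List Char) → List Char → Bool
  | _, [] => false
  | active, c :: rest =>
    match advanceB (active ++ markersB) c with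
    | none => true
    | some nxt => scanB nxt rest

def contains_table_py_alt (text : String) : Bool :=
  scanB [] (PySem.Chars.lower text.toList)

-- ===== PRECONDITION & SPEC =====
def Spec_contains_table_py (text : String) (out : Bool) : Prop := out = contains_table_py_alt text
instance (text : String) (out : Bool) : Decidable (Spec_contains_table_py text out) := by unfold Spec_contains_table_py; infer_instance

-- ===== CLAIM (what is proved, stated in full; the proofs are below) =====
def Claim_equal_contains_table_py : Prop := ∀ (text : String), Dom_contains_table_py text → Spec_contains_table_py text (contains_table_py text)

-- ===== LEMMAS AND PROOFS =====

-- every marker is nonempty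
theorem markersB_ne_nil : ∀ m ∈ markersB, m ≠ [] := by decide

-- the step function advanceB as a filterMap (proof-side view of the inner loop)
def stepF (c : Char) : List Char → Option (List Char)
  | [] => none
  | d :: ds => if d = c then some ds else none

theorem stepF_eq_some {c : Char} {a r : List Char} : stepF c a = some r ↔ a = c :: r := by
  cases a with
  | nil => simp [stepF]
  | cons d ds =>
    simp only [stepF]
    by_cases h : d = c <;> simp [h]

-- advanceB returns none exactly when some remainder is the single char [c]
theorem advanceB_eq_none {l : List (List Char)} {c : Char} :
    advanceB l c = none ↔ [c] ∈ l := by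
  induction l with
  | nil => simp [advanceB]
  | cons rem rs ih =>
    cases rem with
    | nil => simp [advanceB, ih]
    | cons d ds =>
      simp only [advanceB]
      by_cases hd : d = c
      · cases ds with
        | nil => simp [hd]
        | cons e es =>
          simp only [hd, beq_self_eq_true, if_true, List.isEmpty_cons]
          constructor
          · intro h
            rcases Option.map_eq_none_iff.mp h with h'
            simp [ih.mp h']
          · intro h
            rcases List.mem_cons.mp h with h' | h'
            · simp at h'
            · simp [ih.mpr h']
      · have : (d == c) = false := by simp [hd]
        rw [this]
        simp only [Bool.false_eq_true, if_false, ih, List.mem_cons]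
        constructor
        · exact Or.inr
        · rintro (h' | h')
          · exact absurd h'.symm (by simp [hd])
          · exact h'

-- when no remainder is exactly [c], advanceB computes the filterMap of stepF
theorem advanceB_eq_some {l : List (List Char)} {c : Char} (h : [c] ∉ l) :
    advanceB l c = some (l.filterMap (stepF c)) := by
  induction l with
  | nil => simp [advanceB]
  | cons rem rs ih =>
    have hrs : [c] ∉ rs := fun hm => h (List.mem_cons_of_mem _ hm)
    cases rem with
    | nil => simpa [advanceB, stepF] using ih hrs
    | cons d ds =>
      simp only [advanceB]
      by_cases hd : d = c
      · cases ds with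
        | nil => exact absurd (by simp [hd]) h
        | cons e es =>
          simp [hd, ih hrs, stepF]
      · have hbeq : (d == c) = false := by simp [hd]
        simp [hbeq, ih hrs, stepF, hd]

-- characterisation of the state-set scan: it finds exactly the inputs where some
-- current remainder completes, or some marker occurs as prefix of some suffix
theorem scanB_iff (s : List Char) : ∀ (active : List (List Char)),
    scanB active s = true ↔
      (∃ r ∈ active, r ≠ [] ∧ r <+: s) ∨ (∃ m ∈ markersB, ∃ j, m <+: s.drop j) := by
  induction s with
  | nil =>
    intro active
    refine iff_of_false (by simp [scanB]) ?_
    rintro (⟨r, _, hne, hp⟩ | ⟨m, hm, j, hp⟩)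
    · exact hne (List.prefix_nil.mp hp)
    · exact markersB_ne_nil m hm (List.prefix_nil.mp (by simpa using hp))
  | cons c rest ih =>
    intro active
    by_cases hc : [c] ∈ active ++ markersB
    · rw [show scanB active (c :: rest) = true by
        simp [scanB, advanceB_eq_none.mpr hc]]
      simp only [true_iff]
      rcases List.mem_append.mp hc with h | h
      · exact Or.inl ⟨[c], h, by simp, by simp⟩
      · exact Or.inr ⟨[c], h, 0, by simp⟩
    · rw [show scanB active (c :: rest) = scanB ((active ++ markersB).filterMap (stepF c)) rest by
        simp [scanB, advanceB_eq_some hc]]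
      rw [ih]
      constructor
      · rintro (⟨r, hr, hne, hp⟩ | ⟨m, hm, j, hp⟩)
        · rcases List.mem_filterMap.mp hr with ⟨a, ha, hstep⟩
          obtain rfl : a = c :: r := stepF_eq_some.mp hstep
          rcases List.mem_append.mp ha with ha' | ha'
          · exact Or.inl ⟨c :: r, ha', by simp, List.cons_prefix_cons.mpr ⟨rfl, hp⟩⟩
          · exact Or.inr ⟨c :: r, ha', 0,
              by simpa using (List.cons_prefix_cons.mpr ⟨rfl, hp⟩ : c :: r <+: c :: rest)⟩
        · exact Or.inr ⟨m, hm, j + 1, by simpa using hp⟩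
      · rintro (⟨r, hr, hne, hp⟩ | ⟨m, hm, j, hp⟩)
        · obtain ⟨d, ds, rfl⟩ := List.exists_cons_of_ne_nil hne
          obtain ⟨rfl, hds⟩ := List.cons_prefix_cons.mp hp
          cases ds with
          | nil => exact absurd (List.mem_append_left _ hr) hc
          | cons e es =>
            exact Or.inl ⟨e :: es,
              List.mem_filterMap.mpr ⟨d :: e :: es, List.mem_append_left _ hr, stepF_eq_some.mpr rfl⟩,
              by simp, hds⟩
        · cases j with
          | zero =>
            obtain ⟨d, ds, rfl⟩ := List.exists_cons_of_ne_nil (markersB_ne_nil m hm)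
            obtain ⟨rfl, hds⟩ := List.cons_prefix_cons.mp (by simpa using hp)
            cases ds with
            | nil => exact absurd (List.mem_append_right _ hm) hc
            | cons e es =>
              exact Or.inl ⟨e :: es,
                List.mem_filterMap.mpr ⟨d :: e :: es, List.mem_append_right _ hm, stepF_eq_some.mpr rfl⟩,
                by simp, hds⟩
          | succ j => exact Or.inr ⟨m, hm, j, by simpa using hp⟩

-- the lowered indicator lists are exactly B's markers
theorem lower_indicators :
    tableIndicators.map (fun ind => PySem.Chars.lower ind.toList) = markersB := by decide

-- ===== VERDICT (by name: the statement is the Claim_ definition above) =====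
theorem contains_table_py_spec : Claim_equal_contains_table_py := by
  intro text _
  unfold Spec_contains_table_py contains_table_py contains_table_py_alt
  simp only [PySem.Str.isIn_eq, PySem.Str.toList_lower]
  rw [Bool.eq_iff_iff, List.any_eq_true, scanB_iff]
  constructor
  · rintro ⟨ind, hind, hin⟩
    obtain ⟨j, hp⟩ := (PySem.Chars.exists_prefix_drop_iff_isIn _ _).mpr hin
    refine Or.inr ⟨PySem.Chars.lower ind.toList, ?_, j, hp⟩
    rw [← lower_indicators]
    exact List.mem_map_of_mem hind
  · rintro (⟨r, hr, _⟩ | ⟨m, hm, j, hp⟩)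
    · simp at hr
    · rw [← lower_indicators, List.mem_map] at hm
      obtain ⟨ind, hind, rfl⟩ := hm
      exact ⟨ind, hind, (PySem.Chars.exists_prefix_drop_iff_isIn _ _).mp ⟨j, hp⟩⟩
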